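-- pv_equiv track=rewrite | github.com/Shibai2025/JBG040-Advanced-Data-Challenge-Group-11 | dc1/main_experiment_resnet18_balance_effect.py | parse_setting_list
-- ===== SOURCE A (Python) =====
-- from typing import Dict, List, Optional, Sequence, Tuple
--
-- def parse_setting_list(raw_items: Sequence[str]) -> List[str]:
--     allowed = {"none", "balanced_batch"}
--     parsed: List[str] = []
--
--     for item in raw_items:
--         for token in item.split(","):
--             name = token.strip().lower()
--             if not name:
--                 continue
--             if name not in allowed:
--                 raise ValueError(f"Unsupported setting '{name}'. Choose from: {sorted(allowed)}")
--             if name not in parsed: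
--                 parsed.append(name)
--
--     return parsed
-- ===== SOURCE B (Python) =====
-- def parse_setting_list(raw_items):
--     allowed = ("none", "balanced_batch")
--     # flatten + normalize
--     toks = [t.strip().lower() for item in raw_items for t in item.split(",")]
--     toks = [t for t in toks if t]
--     # validation by filtering out the bad tokens; report the first one
--     bad = [t for t in toks if t not in allowed]
--     if bad:
--         raise ValueError(f"Unsupported setting '{bad[0]}'. Choose from: {sorted(allowed)}")
--     # inverted dedupe: iterate the (tiny) vocabulary, not the token stream:
--     # first-occurrence index of each allowed name, then order names by that index
--     present = {name: toks.index(name) for name in allowed if name in toks}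
--     return sorted(present, key=present.get)
-- ===== Notes on version B (the rewrite author's own statement) =====
-- stated objective: alternative
-- what changed: Replaces A's single interleaved loop (per-token validate + linear membership-scan dedupe appending to the result) by staged passes and an inverted dedupe: flatten/normalize, filter, validate by filtering the bad tokens, then iterate the fixed allowed vocabulary computing each name's first-occurrence index and sort the present names by that index.
import Mathlib
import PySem

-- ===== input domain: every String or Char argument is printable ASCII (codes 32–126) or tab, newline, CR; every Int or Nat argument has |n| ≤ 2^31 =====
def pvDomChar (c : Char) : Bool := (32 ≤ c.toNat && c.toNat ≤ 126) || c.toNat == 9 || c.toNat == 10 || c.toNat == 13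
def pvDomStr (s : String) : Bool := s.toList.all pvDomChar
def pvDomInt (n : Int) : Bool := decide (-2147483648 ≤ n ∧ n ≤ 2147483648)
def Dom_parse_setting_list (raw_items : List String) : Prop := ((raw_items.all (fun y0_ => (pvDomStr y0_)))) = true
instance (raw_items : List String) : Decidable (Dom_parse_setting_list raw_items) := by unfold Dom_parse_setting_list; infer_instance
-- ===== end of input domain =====

-- B replaces A's single interleaved validate+dedupe loop by staged passes and an inverted dedupe
-- (first-occurrence index per allowed name, names sorted by that index); same values and same ValueError everywhere.

-- ===== PORT A =====
-- one interleaved nested loop; 'none' models the ValueError raise (excluded by Pre_)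
def parse_setting_list (raw_items : List String) : List String :=
  let allowed : PySem.Set String := PySem.Set.ofList ["none", "balanced_batch"]
  ((raw_items.foldl (fun acc item =>
      (((PySem.Str.split? item ",").getD [])).foldl (fun acc2 token =>
        match acc2 with
        | none => none
        | some parsed =>
          let name := PySem.Str.lower (PySem.Str.strip token)
          if name = "" then some parsed
          else if !(PySem.Set.contains allowed name) then none
          else if parsed.contains name then some parsed
          else some (parsed ++ [name])) acc) (some ([] : List String))).getD [])

-- ===== PORT B =====
-- flatten+normalize, filter empties, validate by filtering bad tokens,
-- then first-occurrence index per allowed name and sort names by index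
def parse_setting_list_alt (raw_items : List String) : List String :=
  let allowed : List String := ["none", "balanced_batch"]
  let toks0 := (raw_items.flatMap (fun item => ((PySem.Str.split? item ",").getD []))).map
      (fun t => PySem.Str.lower (PySem.Str.strip t))
  let toks := toks0.filter (fun t => t ≠ "")
  let bad := toks.filter (fun t => !(allowed.contains t))
  match bad with
  | _ :: _ => []  -- ValueError raise on bad[0] (excluded by Pre_)
  | [] =>
    let present := allowed.filterMap (fun name =>
      (PySem.List.index? toks name).map (fun i => (name, i)))
    (PySem.List.sorted present (fun p => p.2) false).map (fun p => p.1)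

-- ===== PRECONDITION & SPEC =====
-- Pre_ excludes exactly the inputs on which A raises ValueError (a normalized token outside the allowed set); B raises the identical ValueError there.
def Pre_parse_setting_list (raw_items : List String) : Prop :=
  ∀ item ∈ raw_items, ∀ token ∈ ((PySem.Str.split? item ",").getD []),
    PySem.Str.lower (PySem.Str.strip token) = "" ∨
    PySem.Str.lower (PySem.Str.strip token) = "none" ∨
    PySem.Str.lower (PySem.Str.strip token) = "balanced_batch"
instance (raw_items : List String) : Decidable (Pre_parse_setting_list raw_items) := by
  unfold Pre_parse_setting_list; infer_instance

def pvWitness_parse_setting_list : List String := ["NONE, balanced_batch", " ,none"]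

def Spec_parse_setting_list (raw_items : List String) (out : List String) : Prop := out = parse_setting_list_alt raw_items
instance (raw_items : List String) (out : List String) : Decidable (Spec_parse_setting_list raw_items out) := by unfold Spec_parse_setting_list; infer_instance

-- ===== CLAIM (what is proved, stated in full; the proofs are below) =====
def Claim_equal_parse_setting_list : Prop := ∀ (raw_items : List String), Dom_parse_setting_list raw_items → Pre_parse_setting_list raw_items → Spec_parse_setting_list raw_items (parse_setting_list raw_items)

-- ===== LEMMAS AND PROOFS =====

def pslNorm (t : String) : String := PySem.Str.lower (PySem.Str.strip t)

def pslAllowed : PySem.Set String := PySem.Set.ofList ["none", "balanced_batch"]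

def pslStep (acc2 : Option (List String)) (token : String) : Option (List String) :=
  match acc2 with
  | none => none
  | some parsed =>
    let name := pslNorm token
    if name = "" then some parsed
    else if !(PySem.Set.contains pslAllowed name) then none
    else if parsed.contains name then some parsed
    else some (parsed ++ [name])

lemma psl_inner (ts : List String) (p : List String)
    (h : ∀ t ∈ ts, pslNorm t = "" ∨ pslNorm t = "none" ∨ pslNorm t = "balanced_batch") :
    ts.foldl pslStep (some p)
      = some (((ts.map pslNorm).filter (fun n => n ≠ "")).foldl PySem.Set.add p) := by
  induction ts generalizing p with
  | nil => simp
  | cons t ts ih =>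
    have ht := h t (List.mem_cons_self)
    have hrest : ∀ x ∈ ts, pslNorm x = "" ∨ pslNorm x = "none" ∨ pslNorm x = "balanced_batch" :=
      fun x hx => h x (List.mem_cons_of_mem _ hx)
    simp only [List.foldl_cons, List.map_cons]
    rcases ht with he | hn | hb
    · rw [show pslStep (some p) t = some p by simp [pslStep, he]]
      rw [ih p hrest]
      simp [he]
    · rw [show pslStep (some p) t = some (PySem.Set.add p (pslNorm t)) by
        simp [pslStep, hn, pslAllowed, PySem.Set.add, PySem.Set.contains]
        split <;> rfl]
      rw [ih _ hrest]
      simp [hn]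
    · rw [show pslStep (some p) t = some (PySem.Set.add p (pslNorm t)) by
        simp [pslStep, hb, pslAllowed, PySem.Set.add, PySem.Set.contains]
        split <;> rfl]
      rw [ih _ hrest]
      simp [hb]

lemma psl_outer (items : List String) (p : List String)
    (h : ∀ item ∈ items, ∀ token ∈ ((PySem.Str.split? item ",").getD []),
      pslNorm token = "" ∨ pslNorm token = "none" ∨ pslNorm token = "balanced_batch") :
    items.foldl (fun acc item => (((PySem.Str.split? item ",").getD [])).foldl pslStep acc) (some p)
      = some ((items.flatMap (fun item =>
          ((((PySem.Str.split? item ",").getD [])).map pslNorm).filter (fun n => n ≠ ""))).foldl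
            PySem.Set.add p) := by
  induction items generalizing p with
  | nil => simp
  | cons it its ih =>
    simp only [List.foldl_cons, List.flatMap_cons, List.foldl_append]
    rw [psl_inner _ _ (h it List.mem_cons_self)]
    exact ih _ (fun x hx => h x (List.mem_cons_of_mem _ hx))

-- once the accumulator already holds every element of ts, further adds are no-ops
lemma psl_foldl_add_of_subset (ts s : List String) (h : ∀ t ∈ ts, t ∈ s) :
    ts.foldl PySem.Set.add s = s := by
  induction ts with
  | nil => rfl
  | cons t ts ih =>
    have : PySem.Set.add s t = s := by
      simp [PySem.Set.add, List.contains_eq_mem, h t List.mem_cons_self]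
    simp only [List.foldl_cons, this]
    exact ih (fun x hx => h x (List.mem_cons_of_mem _ hx))

-- over a two-value alphabet: folding adds into [a]
lemma psl_foldl_add_two (a b : String) (hab : a ≠ b) (ts : List String)
    (h : ∀ t ∈ ts, t = a ∨ t = b) :
    ts.foldl PySem.Set.add [a] = if b ∈ ts then [a, b] else [a] := by
  induction ts with
  | nil => simp
  | cons t ts ih =>
    have hrest : ∀ x ∈ ts, x = a ∨ x = b := fun x hx => h x (List.mem_cons_of_mem _ hx)
    rcases h t List.mem_cons_self with rfl | rfl
    · have : PySem.Set.add [t] t = [t] := by simp [PySem.Set.add]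
      simp only [List.foldl_cons, this, ih hrest]
      by_cases hb : b ∈ ts <;> simp [hb, hab.symm]
    · have : PySem.Set.add [a] t = [a, t] := by
        simp [PySem.Set.add, List.contains_eq_mem, hab.symm]
      simp only [List.foldl_cons, this]
      rw [psl_foldl_add_of_subset ts [a, t]
        (fun x hx => by rcases hrest x hx with rfl | rfl <;> simp)]
      simp

-- B's tail (first-index-per-name, sorted by index) equals Python's dict.fromkeys dedup
lemma psl_main (toks : List String) (h : ∀ t ∈ toks, t = "none" ∨ t = "balanced_batch") :
    (PySem.List.sorted (["none", "balanced_batch"].filterMap (fun name =>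
        (PySem.List.index? toks name).map (fun i => (name, i)))) (fun p => p.2) false).map
        (fun p => p.1)
      = PySem.Set.ofList toks := by
  cases toks with
  | nil => decide
  | cons t rest =>
    have hrest : ∀ x ∈ rest, x = "none" ∨ x = "balanced_batch" :=
      fun x hx => h x (List.mem_cons_of_mem _ hx)
    have hof : ∀ (a b : String), a ≠ b → t = a → (∀ x ∈ rest, x = a ∨ x = b) →
        PySem.Set.ofList (t :: rest) = if b ∈ rest then [a, b] else [a] := by
      intro a b hab hta hr
      subst hta
      rw [PySem.Set.ofList_eq_foldl]
      simp only [List.foldl_cons]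
      rw [show PySem.Set.add ([] : PySem.Set String) t = [t] by simp [PySem.Set.add]]
      exact psl_foldl_add_two t b hab rest hr
    rcases h t List.mem_cons_self with rfl | rfl
    · rw [hof "none" "balanced_batch" (by decide) rfl hrest]
      simp only [List.filterMap_cons, List.filterMap_nil]
      rw [PySem.List.index?_cons_self]
      rw [PySem.List.index?_cons_of_ne rest (show ("none" : String) ≠ "balanced_batch" by decide)]
      by_cases hb : "balanced_batch" ∈ rest
      · obtain ⟨j, hj⟩ := Option.isSome_iff_exists.mp
          ((PySem.List.index?_isSome_iff rest "balanced_batch").mpr hb)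
        rw [hj]
        simp only [Option.map_some, hb, if_true]
        rw [PySem.List.sorted_eq_self_of_pairwise _ _ (by simp)]
        rfl
      · rw [(PySem.List.index?_eq_none_iff rest "balanced_batch").mpr hb]
        simp only [Option.map_some, Option.map_none, hb, if_false]
        rw [PySem.List.sorted_eq_self_of_pairwise _ _ (by simp)]
        rfl
    · rw [hof "balanced_batch" "none" (by decide) rfl (fun x hx => (hrest x hx).symm)]
      simp only [List.filterMap_cons, List.filterMap_nil]
      rw [PySem.List.index?_cons_self]
      rw [PySem.List.index?_cons_of_ne rest (show ("balanced_batch" : String) ≠ "none" by decide)]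
      by_cases hn : "none" ∈ rest
      · obtain ⟨j, hj⟩ := Option.isSome_iff_exists.mp
          ((PySem.List.index?_isSome_iff rest "none").mpr hn)
        rw [hj]
        simp only [Option.map_some, hn, if_true]
        rw [PySem.List.sorted_eq_of_perm_of_pairwise_lt _
          [("balanced_batch", (0 : Nat)), ("none", j + 1)] _
          (by exact List.Perm.swap _ _ _) (by simp)]
        rfl
      · rw [(PySem.List.index?_eq_none_iff rest "none").mpr hn]
        simp only [Option.map_some, Option.map_none, hn, if_false]
        rw [PySem.List.sorted_eq_self_of_pairwise _ _ (by simp)]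
        rfl

-- ===== VERDICT (by name: the statement is the Claim_ definition above) =====
theorem parse_setting_list_spec : Claim_equal_parse_setting_list := by
  intro raw_items _ hpre
  unfold Spec_parse_setting_list
  have hpre' : ∀ item ∈ raw_items, ∀ token ∈ ((PySem.Str.split? item ",").getD []),
      pslNorm token = "" ∨ pslNorm token = "none" ∨ pslNorm token = "balanced_batch" := hpre
  have hA : parse_setting_list raw_items
      = (raw_items.foldl (fun acc item =>
          (((PySem.Str.split? item ",").getD [])).foldl pslStep acc) (some [])).getD [] := rfl
  set toks := ((raw_items.flatMap (fun item => ((PySem.Str.split? item ",").getD []))).map pslNorm).filter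
      (fun t => t ≠ "") with htoks
  have hflat : toks = raw_items.flatMap (fun item =>
          ((((PySem.Str.split? item ",").getD [])).map pslNorm).filter (fun n => n ≠ "")) := by
    rw [htoks]; simp [List.map_flatMap, List.filter_flatMap]
  have hallow : ∀ t ∈ toks, t = "none" ∨ t = "balanced_batch" := by
    intro t ht
    rw [htoks] at ht
    simp only [List.mem_filter, List.mem_map, List.mem_flatMap] at ht
    obtain ⟨⟨tok, ⟨item, hitem, htok⟩, hnt⟩, hne⟩ := ht
    rcases hpre' item hitem tok htok with he | hn | hb
    · exact absurd (hnt ▸ he) (by simpa using hne)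
    · exact Or.inl (hnt ▸ hn)
    · exact Or.inr (hnt ▸ hb)
  have hbad : toks.filter (fun t => !((["none", "balanced_batch"] : List String).contains t)) = [] := by
    rw [List.filter_eq_nil_iff]
    intro t ht
    rcases hallow t ht with rfl | rfl <;> decide
  have hB : parse_setting_list_alt raw_items
      = (PySem.List.sorted (["none", "balanced_batch"].filterMap (fun name =>
          (PySem.List.index? toks name).map (fun i => (name, i)))) (fun p => p.2) false).map
          (fun p => p.1) := by
    have hB0 : parse_setting_list_alt raw_items
        = (match toks.filter (fun t => !((["none", "balanced_batch"] : List String).contains t)) with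
           | _ :: _ => []
           | [] => (PySem.List.sorted (["none", "balanced_batch"].filterMap (fun name =>
               (PySem.List.index? toks name).map (fun i => (name, i)))) (fun p => p.2) false).map
               (fun p => p.1)) := rfl
    rw [hB0, hbad]
  rw [hA, hB, psl_outer _ _ hpre', psl_main toks hallow]
  simp only [Option.getD_some]
  rw [PySem.Set.ofList_eq_foldl, hflat]
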